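-- pv_equiv track=rewrite | github.com/DestructionCatalyst/thuebf | bf.py | find_brackets
-- ===== SOURCE A (Python) =====
-- from typing import Union, Dict, Tuple
--
-- def find_brackets(program: str) -> Tuple[Dict[int, int], Dict[int, int]]:
--     stack = []
--     open_to_close = {}
--     close_to_open = {}
--     for pos, op in enumerate(program):
--         if op == '[':
--             stack.append(pos)
--         elif op == ']':
--             if stack:
--                 open = stack.pop()
--             else:
--                 raise Exception("Unmatched ]")
--             open_to_close[open] = pos
--             close_to_open[pos] = open
--     if stack:
--         raise Exception("Unmatched [")
--     return open_to_close, close_to_open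
-- ===== SOURCE B (Python) =====
-- def find_brackets(program):
--     open_to_close = {}
--     close_to_open = {}
--     n = len(program)
--
--     def scan(i):
--         # Parse from index i; return the index of the ']' that closes the
--         # enclosing level, or n if the end of the program is reached.
--         while i < n:
--             c = program[i]
--             if c == '[':
--                 j = scan(i + 1)
--                 if j == n:
--                     raise Exception("Unmatched [")
--                 open_to_close[i] = j
--                 close_to_open[j] = i
--                 i = j + 1
--             elif c == ']':
--                 return i
--             else:
--                 i += 1
--         return n
--
--     end = scan(0)
--     if end != n:
--         raise Exception("Unmatched ]")
--     return open_to_close, close_to_open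
-- ===== Notes on version B (the rewrite author's own statement) =====
-- stated objective: alternative
-- what changed: Replaced A's explicit-stack single loop with a recursive-descent parser whose helper scans from an index and recurses on '[' to find the matching ']', recording each pair as the recursion unwinds; the nesting stack becomes the call stack.
import Mathlib
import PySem

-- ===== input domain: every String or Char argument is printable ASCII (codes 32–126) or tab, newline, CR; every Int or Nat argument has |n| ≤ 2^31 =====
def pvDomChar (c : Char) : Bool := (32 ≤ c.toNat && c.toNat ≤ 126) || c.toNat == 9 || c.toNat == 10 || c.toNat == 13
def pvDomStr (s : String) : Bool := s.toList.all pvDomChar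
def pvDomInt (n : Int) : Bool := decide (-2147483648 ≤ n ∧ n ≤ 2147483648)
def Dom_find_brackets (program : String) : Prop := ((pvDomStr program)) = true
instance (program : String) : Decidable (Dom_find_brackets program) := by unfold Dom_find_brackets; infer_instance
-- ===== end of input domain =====

-- B re-implements A's explicit-stack bracket matcher as a recursive-descent parser
-- (objective: alternative decomposition, same cost); equivalence is about the return value,
-- both raise exactly on unbalanced input (excluded by Pre_).

-- ===== PORT A =====
-- A's loop state: (stack, open_to_close, close_to_open); none = the "Unmatched ]" exception.
-- The stack is kept head-first: 'stack.append(pos)' is 'pos :: stack', 'stack.pop()' takes the head.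
def fbStateA : Type := List Int × PySem.Dict Int Int × PySem.Dict Int Int

def fbStepA (st : Option fbStateA) (pc : Int × Char) : Option fbStateA :=
  match st with
  | none => none
  | some (stack, o2c, c2o) =>
    if pc.2 = '[' then some (pc.1 :: stack, o2c, c2o)
    else if pc.2 = ']' then
      match stack with
      | [] => none            -- raise Exception("Unmatched ]")
      | openPos :: rest => some (rest, o2c.insert openPos pc.1, c2o.insert pc.1 openPos)
    else st

def find_brackets (program : String) : (List (Int × Int)) × (List (Int × Int)) :=
  match (PySem.List.enumerate program.toList 0).foldl fbStepA
      (some ([], PySem.Dict.empty, PySem.Dict.empty)) with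
  | none => ([], [])                  -- "Unmatched ]" raised: no return value (outside Pre_)
  | some (stack, o2c, c2o) =>
    match stack with
    | [] => (o2c.items, c2o.items)
    | _ :: _ => ([], [])              -- "Unmatched [" raised: no return value (outside Pre_)

-- ===== PORT B =====
-- scan returns: term j rest o2c c2o = hit ']' at j, rest follows it; done = clean end; err = "Unmatched [".
inductive FbScan : Type
  | term : Int → List Char → PySem.Dict Int Int → PySem.Dict Int Int → FbScan
  | done : PySem.Dict Int Int → PySem.Dict Int Int → FbScan
  | err : FbScan

-- fuel only makes the recursion structural; fuel > length of the list never runs out (proved in the lemmas).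
def fbScan : Nat → List Char → Int → PySem.Dict Int Int → PySem.Dict Int Int → FbScan
  | 0, _, _, _, _ => .err
  | _ + 1, [], _, o2c, c2o => .done o2c c2o
  | f + 1, c :: rest, pos, o2c, c2o =>
    if c = '[' then
      match fbScan f rest (pos + 1) o2c c2o with
      | .term j rest' o2c' c2o' => fbScan f rest' (j + 1) (o2c'.insert pos j) (c2o'.insert j pos)
      | .done _ _ => .err             -- raise Exception("Unmatched [")
      | .err => .err
    else if c = ']' then .term pos rest o2c c2o
    else fbScan f rest (pos + 1) o2c c2o

def find_brackets_alt (program : String) : (List (Int × Int)) × (List (Int × Int)) :=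
  match fbScan (program.toList.length + 1) program.toList 0 PySem.Dict.empty PySem.Dict.empty with
  | .done o2c c2o => (o2c.items, c2o.items)
  | _ => ([], [])                     -- "Unmatched ]" / "Unmatched [" raised (outside Pre_)

-- ===== PRECONDITION & SPEC =====
-- Pre_ = balanced square brackets: exactly the inputs on which Python A returns (it raises otherwise).
def Pre_find_brackets (program : String) : Prop :=
  (program.toList.count '[' = program.toList.count ']') ∧
  ∀ i ∈ List.range (program.toList.length + 1),
    (program.toList.take i).count ']' ≤ (program.toList.take i).count '['
instance (program : String) : Decidable (Pre_find_brackets program) := by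
  unfold Pre_find_brackets; infer_instance

def pvWitness_find_brackets : String := "+[a[-]>]b[]"

def Spec_find_brackets (program : String) (out : (List (Int × Int)) × (List (Int × Int))) : Prop := out = find_brackets_alt program
instance (program : String) (out : (List (Int × Int)) × (List (Int × Int))) : Decidable (Spec_find_brackets program out) := by unfold Spec_find_brackets; infer_instance

-- ===== CLAIM (what is proved, stated in full; the proofs are below) =====
def Claim_equal_find_brackets : Prop := ∀ (program : String), Dom_find_brackets program → Pre_find_brackets program → Spec_find_brackets program (find_brackets program)

-- ===== LEMMAS AND PROOFS =====

theorem fbStepA_none (l : List (Int × Char)) : l.foldl fbStepA none = none := by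
  induction l with
  | nil => rfl
  | cons p t ih => simpa [fbStepA] using ih

-- The scan/loop correspondence: with enough fuel, fbScan's outcome describes A's fold.
theorem fbScan_fold (fuel : Nat) : ∀ (l : List Char) (pos : Int)
    (o2c c2o : PySem.Dict Int Int), l.length < fuel →
    (match fbScan fuel l pos o2c c2o with
     | .term j rest o2c' c2o' =>
         rest.length < l.length ∧
         (∀ p s, (PySem.List.enumerate l pos).foldl fbStepA (some (p :: s, o2c, c2o))
               = (PySem.List.enumerate rest (j + 1)).foldl fbStepA
                   (some (s, o2c'.insert p j, c2o'.insert j p))) ∧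
         ((PySem.List.enumerate l pos).foldl fbStepA (some ([], o2c, c2o)) = none)
     | .done o2c' c2o' =>
         ∀ s, (PySem.List.enumerate l pos).foldl fbStepA (some (s, o2c, c2o))
              = some (s, o2c', c2o')
     | .err =>
         ∀ s, ∃ stk d1 d2, (PySem.List.enumerate l pos).foldl fbStepA (some (s, o2c, c2o))
              = some (stk, d1, d2) ∧ stk ≠ []) := by
  induction fuel with
  | zero => intro l pos o2c c2o h; omega
  | succ f ih =>
    intro l pos o2c c2o h
    match l with
    | [] => intro s; rfl
    | c :: rest =>
      by_cases hc : c = '['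
      · have hrest : rest.length < f := by simpa using h
        have inner := ih rest (pos + 1) o2c c2o hrest
        match hin : fbScan f rest (pos + 1) o2c c2o with
        | .term j rest' o2c' c2o' =>
          rw [hin] at inner
          simp only [fbScan, if_pos hc, hin]
          obtain ⟨hlen, heq, -⟩ := inner
          have hrest' : rest'.length < f := by omega
          have cont := ih rest' (j + 1) (o2c'.insert pos j) (c2o'.insert j pos) hrest'
          match hcont : fbScan f rest' (j + 1) (o2c'.insert pos j) (c2o'.insert j pos) with
          | .term j2 rest'' o2c'' c2o'' =>
            rw [hcont] at cont
            obtain ⟨hlen2, heq2, hemp2⟩ := cont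
            refine ⟨by simp; omega, ?_, ?_⟩
            · intro p s
              rw [PySem.List.enumerate_cons]
              simp only [List.foldl_cons, fbStepA, if_pos hc]
              rw [heq pos (p :: s), heq2 p s]
            · rw [PySem.List.enumerate_cons]
              simp only [List.foldl_cons, fbStepA, if_pos hc]
              rw [heq pos [], hemp2]
          | .done o2c'' c2o'' =>
            rw [hcont] at cont
            intro s
            rw [PySem.List.enumerate_cons]
            simp only [List.foldl_cons, fbStepA, if_pos hc]
            rw [heq pos s, cont s]
          | .err =>
            rw [hcont] at cont
            intro s
            rw [PySem.List.enumerate_cons]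
            simp only [List.foldl_cons, fbStepA, if_pos hc]
            rw [heq pos s]
            exact cont s
        | .done o2c' c2o' =>
          rw [hin] at inner
          simp only [fbScan, if_pos hc, hin]
          intro s
          rw [PySem.List.enumerate_cons]
          simp only [List.foldl_cons, fbStepA, if_pos hc]
          rw [inner (pos :: s)]
          exact ⟨pos :: s, _, _, rfl, by simp⟩
        | .err =>
          rw [hin] at inner
          simp only [fbScan, if_pos hc, hin]
          intro s
          rw [PySem.List.enumerate_cons]
          simp only [List.foldl_cons, fbStepA, if_pos hc]
          exact inner (pos :: s)
      · by_cases hc2 : c = ']'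
        · simp only [fbScan, if_neg hc, if_pos hc2]
          refine ⟨by simp, ?_, ?_⟩
          · intro p s
            rw [PySem.List.enumerate_cons]
            simp [fbStepA, hc2]
          · rw [PySem.List.enumerate_cons]
            simp only [List.foldl_cons, fbStepA, if_neg hc, if_pos hc2]
            exact fbStepA_none _
        · have hrest : rest.length < f := by simpa using h
          have inner := ih rest (pos + 1) o2c c2o hrest
          match hin : fbScan f rest (pos + 1) o2c c2o with
          | .term j rest' o2c' c2o' =>
            rw [hin] at inner
            simp only [fbScan, if_neg hc, if_neg hc2, hin]
            obtain ⟨hlen, heq, hemp⟩ := inner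
            refine ⟨by simp; omega, ?_, ?_⟩
            · intro p s
              rw [PySem.List.enumerate_cons]
              simp only [List.foldl_cons, fbStepA, if_neg hc, if_neg hc2]
              exact heq p s
            · rw [PySem.List.enumerate_cons]
              simp only [List.foldl_cons, fbStepA, if_neg hc, if_neg hc2]
              exact hemp
          | .done o2c' c2o' =>
            rw [hin] at inner
            simp only [fbScan, if_neg hc, if_neg hc2, hin]
            intro s
            rw [PySem.List.enumerate_cons]
            simp only [List.foldl_cons, fbStepA, if_neg hc, if_neg hc2]
            exact inner s
          | .err =>
            rw [hin] at inner
            simp only [fbScan, if_neg hc, if_neg hc2, hin]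
            intro s
            rw [PySem.List.enumerate_cons]
            simp only [List.foldl_cons, fbStepA, if_neg hc, if_neg hc2]
            exact inner s

-- A's port and B's port agree on EVERY input (both model the exception by ([], [])).
theorem fb_eq (program : String) : find_brackets program = find_brackets_alt program := by
  unfold find_brackets find_brackets_alt
  have h := fbScan_fold (program.toList.length + 1) program.toList 0
    PySem.Dict.empty PySem.Dict.empty (by omega)
  match hs : fbScan (program.toList.length + 1) program.toList 0
      PySem.Dict.empty PySem.Dict.empty with
  | .term j rest o2c' c2o' =>
    rw [hs] at h
    rw [h.2.2]
  | .done o2c' c2o' =>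
    rw [hs] at h
    rw [h []]
  | .err =>
    rw [hs] at h
    obtain ⟨stk, d1, d2, heq, hne⟩ := h []
    rw [heq]
    match stk with
    | [] => exact absurd rfl hne
    | _ :: _ => rfl

-- ===== VERDICT (by name: the statement is the Claim_ definition above) =====
theorem find_brackets_spec : Claim_equal_find_brackets := by
  intro program _ _
  exact fb_eq program
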